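-- pv_equiv track=rewrite | github.com/kyrie-eleison/codingTestStudy | ch6 Sort/4.py | solution
-- ===== SOURCE A (Python) =====
-- def solution(A, B, k):
--     A = sorted(A)
--     B = sorted(B)
--
--     for i in range(k):
--         if A[i] < B[len(B)-1-i]:
--             A[i] = B[len(B)-1-i]
--         else:
--             break
--
--     return sum(A)
-- ===== SOURCE B (Python) =====
-- def solution(A, B, k):
--     top = sorted(B)[max(len(B) - k, 0):]
--     pool = sorted(A + top, reverse=True)
--     return sum(pool[:len(A)])
-- ===== Notes on version B (the rewrite author's own statement) =====
-- stated objective: alternative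
-- what changed: Replaces A's greedy pairwise swap loop (sort both lists, walk k positions comparing A's i-th smallest with B's i-th largest, overwrite or break) by a selection algorithm: pool A's elements with B's k largest and return the sum of the |A| largest of that pool; no pairwise comparison, no break, no mutation.
-- outside the precondition, e.g. on solution([1, 2, 3], [9, 10], 3): A returns 29, B returns 22; on solution([3, 1], [2], 5): A returns 5, B returns 5; on solution([1], [5], 3): A raises IndexError, B returns 5
import Mathlib
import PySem

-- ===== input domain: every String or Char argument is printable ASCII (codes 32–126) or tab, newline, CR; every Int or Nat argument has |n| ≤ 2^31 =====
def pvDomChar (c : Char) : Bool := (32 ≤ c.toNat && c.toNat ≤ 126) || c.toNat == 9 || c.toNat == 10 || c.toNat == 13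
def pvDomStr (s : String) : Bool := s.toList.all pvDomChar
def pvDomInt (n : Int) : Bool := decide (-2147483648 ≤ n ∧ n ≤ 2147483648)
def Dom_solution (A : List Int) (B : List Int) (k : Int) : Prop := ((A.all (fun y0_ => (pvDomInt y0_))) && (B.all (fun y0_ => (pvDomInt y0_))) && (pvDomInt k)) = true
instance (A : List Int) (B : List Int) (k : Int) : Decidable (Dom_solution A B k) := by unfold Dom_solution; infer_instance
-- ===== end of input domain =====

-- B replaces A's greedy pairwise swap loop by a selection algorithm: pool A with B's k
-- largest and sum the |A| largest of the pool (objective: alternative; no speed claim).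

-- ===== PORT A =====
-- the 'for i in range(k)' loop with break: i counts up lazily (fuel = number of indices left,
-- as Python's range yields them), reads A[i] and B[len(B)-1-i], overwrites A[i] or stops;
-- a raising index (excluded by Pre_) returns the current list (unreachable under Pre_)
def pvALoop (b : List Int) : List Int → Int → Nat → List Int
  | a, _, 0 => a
  | a, i, fuel + 1 =>
    match PySem.List.pyGet? a i, PySem.List.pyGet? b ((b.length : Int) - 1 - i) with
    | some ai, some bi =>
        if ai < bi then pvALoop b (PySem.List.pySetD a i bi) (i + 1) fuel else a
    | _, _ => a

def solution (A : List Int) (B : List Int) (k : Int) : Int :=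
  let a := PySem.List.sorted A (fun x => x) false
  let b := PySem.List.sorted B (fun x => x) false
  (pvALoop b a 0 k.toNat).sum

-- ===== PORT B =====
def solution_alt (A : List Int) (B : List Int) (k : Int) : Int :=
  let top := PySem.List.slice (PySem.List.sorted B (fun x => x) false) (some (max ((B.length : Int) - k) 0)) none
  let pool := PySem.List.sorted (A ++ top) (fun x => x) true
  (PySem.List.slice pool none (some (A.length : Int))).sum

-- ===== PRECONDITION & SPEC =====
-- Pre_ excludes k larger than either list's length: there A raises IndexError unless the loop
-- happens to break early, and once the B-index wraps negative A re-uses B's largest elements —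
-- an artefact of negative-index wraparound that B should not reproduce.
def Pre_solution (A : List Int) (B : List Int) (k : Int) : Prop :=
  k ≤ (A.length : Int) ∧ k ≤ (B.length : Int)
instance (A : List Int) (B : List Int) (k : Int) : Decidable (Pre_solution A B k) := by
  unfold Pre_solution; infer_instance
def pvWitness_solution : List Int × List Int × Int := ([1, 5, 2], [7, 3], 2)

def Spec_solution (A : List Int) (B : List Int) (k : Int) (out : Int) : Prop := out = solution_alt A B k
instance (A : List Int) (B : List Int) (k : Int) (out : Int) : Decidable (Spec_solution A B k out) := by unfold Spec_solution; infer_instance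

-- ===== CLAIM (what is proved, stated in full; the proofs are below) =====
def Claim_equal_solution : Prop := ∀ (A : List Int) (B : List Int) (k : Int), Dom_solution A B k → Pre_solution A B k → Spec_solution A B k (solution A B k)

-- ===== LEMMAS AND PROOFS =====

-- break-style gains of A's loop: stop at the first pair that gains nothing
def gainsB : List Int → List Int → Int
  | x :: xs, y :: ys => if x < y then (y - x) + gainsB xs ys else 0
  | _, _ => 0

theorem pvALoop_sum (b : List Int) (K : Nat) :
    ∀ (p q : List Int), K ≤ q.length → p.length + K ≤ b.length →
    (pvALoop b (p ++ q) (p.length : Int) K).sum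
      = (p ++ q).sum + gainsB (q.take K) ((b.reverse.drop p.length).take K) := by
  induction K with
  | zero =>
    intro p q _ _
    simp [pvALoop, gainsB]
  | succ K ih =>
    intro p q hq hb
    obtain ⟨x, q', rfl⟩ : ∃ x q', q = x :: q' := by
      cases q with
      | nil => simp at hq
      | cons x q' => exact ⟨x, q', rfl⟩
    have hsb : p.length < b.length := by omega
    have hgx : PySem.List.pyGet? (p ++ x :: q') (p.length : Int) = some x := by
      rw [PySem.List.pyGet?_natCast]
      rw [List.getElem?_append_right (Nat.le_refl _)]
      simp
    have hjeq : (b.length : Int) - 1 - (p.length : Int)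
        = ((b.length - 1 - p.length : Nat) : Int) := by omega
    have hrev : b.length - 1 - p.length < b.length := by omega
    have hgy : PySem.List.pyGet? b ((b.length : Int) - 1 - (p.length : Int))
        = some b[b.length - 1 - p.length] := by
      rw [hjeq, PySem.List.pyGet?_natCast]
      exact List.getElem?_eq_getElem hrev
    set y : Int := b[b.length - 1 - p.length] with hy
    have hyrev : b.reverse[p.length]'(by simpa using hsb) = y := by
      rw [List.getElem_reverse]
    have hdrop : b.reverse.drop p.length = y :: b.reverse.drop (p.length + 1) := by
      rw [List.drop_eq_getElem_cons (by simpa using hsb), hyrev]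
    simp only [pvALoop, hgx, hgy]
    by_cases hlt : x < y
    · rw [if_pos hlt]
      have hset : PySem.List.pySetD (p ++ x :: q') (p.length : Int) y
          = (p ++ [y]) ++ q' := by
        rw [PySem.List.pySetD_natCast]
        rw [List.set_append]
        simp
      rw [hset]
      have harg : (p.length : Int) + 1 = (((p ++ [y]).length : Nat) : Int) := by
        simp
      rw [harg]
      rw [ih (p ++ [y]) q' (by simpa using hq) (by simp; omega)]
      rw [hdrop]
      simp [gainsB, hlt]
      ring
    · rw [if_neg hlt]
      rw [hdrop]
      simp [gainsB, hlt]

-- the kept/dropped split that A's greedy loop induces: kept = what the loop leaves in A,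
-- dropped = the overwritten prefix of A together with the unused tail of b
def swapPair : List Int → List Int → List Int × List Int
  | a, [] => (a, [])
  | [], b => ([], b)
  | x :: xs, y :: ys =>
    if x < y then
      let p := swapPair xs ys
      (y :: p.1, x :: p.2)
    else (x :: xs, y :: ys)

theorem swapPair_ms : ∀ (b a : List Int),
    ((swapPair a b).1 : Multiset Int) + ((swapPair a b).2 : Multiset Int)
      = (a : Multiset Int) + (b : Multiset Int) := by
  intro b
  induction b with
  | nil => intro a; cases a <;> simp [swapPair]
  | cons y ys ih =>
    intro a
    cases a with
    | nil => simp [swapPair]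
    | cons x xs =>
      by_cases hlt : x < y
      · simp only [swapPair, if_pos hlt]
        have := ih xs
        simp only [← Multiset.cons_coe]
        rw [Multiset.cons_add, Multiset.add_cons, this]
        rw [Multiset.cons_add, Multiset.add_cons, Multiset.cons_swap]
      · simp [swapPair, hlt]

theorem swapPair_perm (a b : List Int) :
    ((swapPair a b).1 ++ (swapPair a b).2).Perm (a ++ b) := by
  apply Multiset.coe_eq_coe.mp
  simpa using swapPair_ms b a

theorem swapPair_length : ∀ (b a : List Int), b.length ≤ a.length →
    (swapPair a b).1.length = a.length := by
  intro b
  induction b with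
  | nil => intro a _; cases a <;> simp [swapPair]
  | cons y ys ih =>
    intro a h
    cases a with
    | nil => simp at h
    | cons x xs =>
      by_cases hlt : x < y
      · simp only [swapPair, if_pos hlt, List.length_cons]
        rw [ih xs (by simpa using h)]
      · simp [swapPair, hlt]

theorem swapPair_sum : ∀ (b a : List Int),
    (swapPair a b).1.sum = a.sum + gainsB a b := by
  intro b
  induction b with
  | nil => intro a; cases a <;> simp [swapPair, gainsB]
  | cons y ys ih =>
    intro a
    cases a with
    | nil => simp [swapPair, gainsB]
    | cons x xs =>
      by_cases hlt : x < y
      · simp only [swapPair, if_pos hlt, List.sum_cons]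
        rw [ih xs, show gainsB (x :: xs) (y :: ys) = (y - x) + gainsB xs ys from by
          simp [gainsB, hlt]]
        ring
      · simp [swapPair, gainsB, hlt]

-- every kept element is at least any lower bound of a
theorem swapPair_min : ∀ (b a : List Int) (x : Int), (∀ u ∈ a, x ≤ u) →
    ∀ z ∈ (swapPair a b).1, x ≤ z := by
  intro b
  induction b with
  | nil =>
    intro a x hx z hz
    cases a <;> simp [swapPair] at hz
    · obtain rfl | hz := hz
      · exact hx _ (by simp)
      · exact hx _ (by simp [hz])
  | cons y ys ih =>
    intro a x hx z hz
    cases a with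
    | nil => simp [swapPair] at hz
    | cons x' xs =>
      by_cases hlt : x' < y
      · simp only [swapPair, if_pos hlt, List.mem_cons] at hz
        obtain rfl | hz := hz
        · have : x ≤ x' := hx _ (by simp)
          omega
        · exact ih xs x (fun u hu => hx u (by simp [hu])) z hz
      · simp only [swapPair, if_neg hlt] at hz
        exact hx _ hz

-- every dropped element is at most any upper bound of b
theorem swapPair_maxd : ∀ (b a : List Int) (y : Int), (∀ u ∈ b, u ≤ y) →
    ∀ w ∈ (swapPair a b).2, w ≤ y := by
  intro b
  induction b with
  | nil => intro a y _ w hw; cases a <;> simp [swapPair] at hw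
  | cons y' ys ih =>
    intro a y hy w hw
    cases a with
    | nil =>
      simp only [swapPair] at hw
      exact hy _ hw
    | cons x xs =>
      by_cases hlt : x < y'
      · simp only [swapPair, if_pos hlt, List.mem_cons] at hw
        obtain rfl | hw := hw
        · have : y' ≤ y := hy _ (by simp)
          omega
        · exact ih xs y (fun u hu => hy u (by simp [hu])) w hw
      · simp only [swapPair, if_neg hlt] at hw
        exact hy _ hw

-- dominance: with a ascending and b descending, every dropped element ≤ every kept element
theorem swapPair_dom : ∀ (b a : List Int), a.Pairwise (· ≤ ·) →
    b.Pairwise (fun p q => q ≤ p) →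
    ∀ w ∈ (swapPair a b).2, ∀ z ∈ (swapPair a b).1, w ≤ z := by
  intro b
  induction b with
  | nil => intro a _ _ w hw; cases a <;> simp [swapPair] at hw
  | cons y ys ih =>
    intro a ha hb w hw z hz
    cases a with
    | nil => simp [swapPair] at hz
    | cons x xs =>
      by_cases hlt : x < y
      · simp only [swapPair, if_pos hlt, List.mem_cons] at hw hz
        obtain rfl | hw := hw
        · obtain rfl | hz := hz
          · omega
          · have := swapPair_min ys xs w (fun u hu => (List.pairwise_cons.mp ha).1 u hu) z hz
            exact this
        · obtain rfl | hz := hz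
          · exact swapPair_maxd ys xs z (fun u hu => (List.pairwise_cons.mp hb).1 u hu) w hw
          · exact ih xs (List.Pairwise.of_cons ha) (List.Pairwise.of_cons hb) w hw z hz
      · simp only [swapPair, if_neg hlt] at hw hz
        have hwy : w ≤ y := by
          rcases List.mem_cons.mp hw with rfl | h
          · exact le_refl _
          · exact (List.pairwise_cons.mp hb).1 _ h
        have hxz : x ≤ z := by
          rcases List.mem_cons.mp hz with rfl | h
          · exact le_refl _
          · exact (List.pairwise_cons.mp ha).1 _ h
        omega

-- gainsB only looks at the first |ys| elements of xs
theorem gainsB_take : ∀ (ys xs : List Int) (n : Nat), ys.length ≤ n →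
    gainsB (xs.take n) ys = gainsB xs ys := by
  intro ys
  induction ys with
  | nil => intro xs n _; cases xs <;> cases n <;> simp [gainsB]
  | cons y ys ih =>
    intro xs n h
    cases xs with
    | nil => simp [gainsB]
    | cons x xs =>
      cases n with
      | zero => simp at h
      | succ n =>
        simp only [List.take_succ_cons, gainsB]
        rw [ih xs n (by simpa using h)]

-- two descending-sorted permutations of the same list are equal
theorem descSorted_unique (l1 l2 : List Int) (hp : l1.Perm l2)
    (h1 : l1.Pairwise (fun p q => q ≤ p)) (h2 : l2.Pairwise (fun p q => q ≤ p)) :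
    l1 = l2 := by
  apply List.Perm.eq_of_pairwise (le := fun p q : Int => q ≤ p)
  · intro a b _ _ hab hba; omega
  · exact h1
  · exact h2
  · exact hp

-- ===== VERDICT (by name: the statement is the Claim_ definition above) =====
theorem solution_spec : Claim_equal_solution := by
  intro A B k _ hpre
  unfold Spec_solution solution solution_alt
  dsimp only
  obtain ⟨hkA, hkB⟩ := hpre
  set a := PySem.List.sorted A (fun x => x) false with ha
  set b := PySem.List.sorted B (fun x => x) false with hb
  have hla : a.length = A.length := PySem.List.length_sorted A _ false
  have hlb : b.length = B.length := PySem.List.length_sorted B _ false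
  set K : Nat := k.toNat with hK
  -- A's side: loop value = a.sum + break-gains over the k-prefixes
  have hmain := pvALoop_sum b K [] a (by rw [hla]; omega) (by simp [hlb]; omega)
  simp only [List.nil_append, List.length_nil, Nat.cast_zero, List.drop_zero] at hmain
  rw [hmain]
  have hsum : a.sum = A.sum := (PySem.List.sorted_perm A (fun x => x) false).sum_eq
  -- B's side
  set bd : List Int := b.reverse.take K with hbd
  have hbdlen : bd.length = K := by
    rw [hbd, List.length_take, List.length_reverse]; omega
  -- the top slice of sorted(B) is bd reversed
  have htop : PySem.List.slice b (some (max ((B.length : Int) - k) 0)) none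
      = b.drop (b.length - K) := by
    rw [PySem.List.slice_from _ (le_max_right _ _)]
    by_cases h : 0 ≤ k
    · congr 1; omega
    · rw [List.drop_eq_nil_of_le (by omega), List.drop_eq_nil_of_le (by omega)]
  have htoprev : (b.drop (b.length - K)).reverse = bd := by
    rw [List.reverse_drop, hbd]
    congr 1
    omega
  set kept : List Int := (swapPair a bd).1 with hkept
  set dropped : List Int := (swapPair a bd).2 with hdropped
  have hak : a.Pairwise (· ≤ ·) := PySem.List.sorted_pairwise A (fun x => x)
  have hbk : bd.Pairwise (fun p q => q ≤ p) := by
    rw [hbd]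
    exact List.Pairwise.take (List.pairwise_reverse.mpr (PySem.List.sorted_pairwise B (fun x => x)))
  -- the descending sort of the pool is (sorted kept desc) ++ (sorted dropped desc)
  set S1 : List Int := PySem.List.sorted kept (fun x => x) true with hS1
  set S2 : List Int := PySem.List.sorted dropped (fun x => x) true with hS2
  have hSsplit : PySem.List.sorted (A ++ b.drop (b.length - K)) (fun x => x) true = S1 ++ S2 := by
    apply descSorted_unique
    · -- permutation: pool ~ a ++ bd ~ kept ++ dropped ~ S1 ++ S2
      refine (PySem.List.sorted_perm _ _ true).trans ?_
      refine List.Perm.trans ?_ (List.Perm.append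
        (PySem.List.sorted_perm kept (fun x => x) true).symm
        (PySem.List.sorted_perm dropped (fun x => x) true).symm)
      refine List.Perm.trans ?_ (swapPair_perm a bd).symm
      exact List.Perm.append (PySem.List.sorted_perm A (fun x => x) false).symm
        ((List.reverse_perm _).symm.trans (by rw [htoprev]))
    · exact PySem.List.sorted_pairwise_rev _ (fun x => x)
    · rw [List.pairwise_append]
      refine ⟨PySem.List.sorted_pairwise_rev _ _, PySem.List.sorted_pairwise_rev _ _, ?_⟩
      intro z hz w hw
      exact swapPair_dom bd a hak hbk w ((PySem.List.mem_sorted _ _ _ _).mp hw)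
        z ((PySem.List.mem_sorted _ _ _ _).mp hz)
  rw [htop, hSsplit]
  have hS1len : S1.length = A.length := by
    rw [hS1, PySem.List.length_sorted, hkept, swapPair_length bd a (by omega), hla]
  have hslice : PySem.List.slice (S1 ++ S2) none (some ((A.length : Int))) = S1 := by
    rw [PySem.List.slice_to_natCast]
    exact List.take_left' hS1len
  rw [hslice]
  have hS1sum : S1.sum = kept.sum := (PySem.List.sorted_perm kept (fun x => x) true).sum_eq
  rw [hS1sum, hkept, swapPair_sum bd a, hsum]
  congr 1
  exact gainsB_take bd a K (by omega)
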